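-- pv_equiv track=rewrite | github.com/Pavan-Nagulla/Dsa | basic maths problems/highest_lowest_frequency_hashmap.py | find_highest_lowest_frequency
-- ===== SOURCE A (Python) =====
-- def find_highest_lowest_frequency(arr):
--     frequency = {}
--
--     for element in arr:
--         if element in frequency:
--             frequency[element] += 1
--         else:
--             frequency[element] = 1
--
--     highest_frequency = max(frequency.values())
--     lowest_frequency = min(frequency.values())
--
--     highest_frequency_elements = [key for key, value in frequency.items() if value == highest_frequency]
--     lowest_frequency_elements = [key for key, value in frequency.items() if value == lowest_frequency]
--
--     return highest_frequency_elements, lowest_frequency_elements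
-- ===== SOURCE B (Python) =====
-- def find_highest_lowest_frequency(arr):
--     counts = {}
--     for x in arr:
--         counts[x] = counts.get(x, 0) + 1
--     buckets = {}
--     for key, c in counts.items():
--         buckets.setdefault(c, []).append(key)
--     return buckets[max(buckets)], buckets[min(buckets)]
-- ===== Notes on version B (the rewrite author's own statement) =====
-- stated objective: alternative
-- what changed: Instead of scanning the frequency dict twice with comprehensions filtering on the max/min count, B inverts the dict once into count->elements buckets and returns the buckets at max and min bucket key.
import Mathlib
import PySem

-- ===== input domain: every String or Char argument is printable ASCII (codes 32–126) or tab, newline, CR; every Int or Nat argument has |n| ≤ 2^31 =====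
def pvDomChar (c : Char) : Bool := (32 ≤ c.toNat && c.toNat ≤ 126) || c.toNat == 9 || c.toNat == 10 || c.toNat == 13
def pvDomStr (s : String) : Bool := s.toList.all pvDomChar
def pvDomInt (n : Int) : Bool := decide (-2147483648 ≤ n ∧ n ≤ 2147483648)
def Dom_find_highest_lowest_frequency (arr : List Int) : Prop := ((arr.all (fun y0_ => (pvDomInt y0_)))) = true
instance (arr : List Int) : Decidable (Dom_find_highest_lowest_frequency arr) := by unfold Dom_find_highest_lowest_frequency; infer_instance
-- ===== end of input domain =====

-- B replaces A's two filtering passes over the frequency dict by a single inversion into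
-- count -> elements buckets, looked up at the max and min bucket key (objective: alternative).

-- ===== PORT A =====
def find_highest_lowest_frequency (arr : List Int) : List Int × List Int :=
  let frequency : PySem.Dict Int Int :=
    arr.foldl (fun d e => if d.contains e then d.insert e (d.getD e 0 + 1) else d.insert e 1)
      PySem.Dict.empty
  match PySem.List.max? frequency.values (fun v => v),
        PySem.List.min? frequency.values (fun v => v) with
  | some hi, some lo =>
      (frequency.items.foldl (fun acc p => if p.2 == hi then acc ++ [p.1] else acc) [],
       frequency.items.foldl (fun acc p => if p.2 == lo then acc ++ [p.1] else acc) [])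
  | _, _ => ([], [])  -- unreachable under Pre_: Python's max() raises ValueError on empty arr

-- ===== PORT B =====
def find_highest_lowest_frequency_alt (arr : List Int) : List Int × List Int :=
  let counts : PySem.Dict Int Int :=
    arr.foldl (fun d x => d.insert x (d.getD x 0 + 1)) PySem.Dict.empty
  let buckets : PySem.Dict Int (List Int) :=
    counts.items.foldl (fun b q => b.modify q.2 [] (· ++ [q.1])) PySem.Dict.empty
  match PySem.List.max? buckets.keys (fun c => c) with
  | none => ([], [])  -- unreachable under Pre_: Python's max() raises ValueError on empty arr
  | some hi =>
      match PySem.List.min? buckets.keys (fun c => c) with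
      | none => ([], [])  -- unreachable under Pre_ likewise
      | some lo => (buckets.getD hi [], buckets.getD lo [])
      -- buckets[hi]/buckets[lo]: the key is a member of buckets, so getD is exact here

-- ===== PRECONDITION & SPEC =====
-- Pre_ excludes only the empty list, on which Python A (and B) raise ValueError from max().
def Pre_find_highest_lowest_frequency (arr : List Int) : Prop := arr ≠ []
instance (arr : List Int) : Decidable (Pre_find_highest_lowest_frequency arr) := by
  unfold Pre_find_highest_lowest_frequency; infer_instance
def pvWitness_find_highest_lowest_frequency : List Int := [1, 2, 2]

def Spec_find_highest_lowest_frequency (arr : List Int) (out : List Int × List Int) : Prop := out = find_highest_lowest_frequency_alt arr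
instance (arr : List Int) (out : List Int × List Int) : Decidable (Spec_find_highest_lowest_frequency arr out) := by unfold Spec_find_highest_lowest_frequency; infer_instance

-- ===== CLAIM (what is proved, stated in full; the proofs are below) =====
def Claim_equal_find_highest_lowest_frequency : Prop := ∀ (arr : List Int), Dom_find_highest_lowest_frequency arr → Pre_find_highest_lowest_frequency arr → Spec_find_highest_lowest_frequency arr (find_highest_lowest_frequency arr)

-- ===== LEMMAS AND PROOFS =====

-- A's count loop (membership branch) is the same fold as B's (get-with-default).
theorem count_step_eq :
    (fun (d : PySem.Dict Int Int) e => if d.contains e then d.insert e (d.getD e 0 + 1) else d.insert e 1)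
      = (fun (d : PySem.Dict Int Int) x => d.insert x (d.getD x 0 + 1)) := by
  funext d e
  by_cases h : d.contains e = true
  · simp [h]
  · have h' : d.contains e = false := by simpa using h
    simp [h', PySem.Dict.getD_of_not_contains]

-- the bucket-inversion loop, characterised: looking up count c yields the keys whose count is c
theorem buckets_getD (items : List (Int × Int)) (b : PySem.Dict Int (List Int)) (c : Int) :
    (items.foldl (fun b q => b.modify q.2 [] (· ++ [q.1])) b).getD c []
      = b.getD c [] ++ (items.filter (fun q => q.2 == c)).map (·.1) := by
  induction items generalizing b with
  | nil => simp
  | cons q rest ih =>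
      simp only [List.foldl_cons, ih, List.filter_cons]
      by_cases h : q.2 = c
      · simp [h]
      · simp [h, PySem.Dict.getD_modify, Ne.symm h]

-- A's comprehension loop, characterised (specialised form of PySem.List.foldl_append_if)
theorem comp_foldl (items : List (Int × Int)) (acc : List Int) (h : Int) :
    items.foldl (fun acc p => if p.2 == h then acc ++ [p.1] else acc) acc
      = acc ++ (items.filter (fun q => q.2 == h)).map (·.1) := by
  induction items generalizing acc with
  | nil => simp
  | cons q rest ih =>
      simp only [List.foldl_cons, ih, List.filter_cons]
      by_cases hq : q.2 = h <;> simp [hq]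

-- max?/min? with the identity key depend only on membership
theorem max?_congr_mem (xs ys : List Int) (h : ∀ x, x ∈ xs ↔ x ∈ ys) :
    PySem.List.max? xs (fun v => v) = PySem.List.max? ys (fun v => v) := by
  cases hx : PySem.List.max? xs (fun v => v) with
  | none =>
      rw [PySem.List.max?_eq_none_iff] at hx
      cases hy : PySem.List.max? ys (fun v => v) with
      | none => rfl
      | some m => exact absurd ((h m).mpr (PySem.List.max?_mem hy)) (by simp [hx])
  | some m =>
      cases hy : PySem.List.max? ys (fun v => v) with
      | none =>
          rw [PySem.List.max?_eq_none_iff] at hy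
          exact absurd ((h m).mp (PySem.List.max?_mem hx)) (by simp [hy])
      | some m' =>
          have h1 := PySem.List.max?_isMax hx m' ((h m').mpr (PySem.List.max?_mem hy))
          have h2 := PySem.List.max?_isMax hy m ((h m).mp (PySem.List.max?_mem hx))
          simp only [Option.some_inj]
          omega

theorem min?_congr_mem (xs ys : List Int) (h : ∀ x, x ∈ xs ↔ x ∈ ys) :
    PySem.List.min? xs (fun v => v) = PySem.List.min? ys (fun v => v) := by
  cases hx : PySem.List.min? xs (fun v => v) with
  | none =>
      rw [PySem.List.min?_eq_none_iff] at hx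
      cases hy : PySem.List.min? ys (fun v => v) with
      | none => rfl
      | some m => exact absurd ((h m).mpr (PySem.List.min?_mem hy)) (by simp [hx])
  | some m =>
      cases hy : PySem.List.min? ys (fun v => v) with
      | none =>
          rw [PySem.List.min?_eq_none_iff] at hy
          exact absurd ((h m).mp (PySem.List.min?_mem hx)) (by simp [hy])
      | some m' =>
          have h1 := PySem.List.min?_isMin hx m' ((h m').mpr (PySem.List.min?_mem hy))
          have h2 := PySem.List.min?_isMin hy m ((h m).mp (PySem.List.min?_mem hx))
          simp only [Option.some_inj]
          omega

-- the bucket keys are exactly the counts that occur as values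
theorem buckets_keys_mem (items : List (Int × Int)) (c : Int) :
    c ∈ (items.foldl (fun b q => b.modify q.2 [] (· ++ [q.1]))
          (PySem.Dict.empty : PySem.Dict Int (List Int))).keys
      ↔ c ∈ items.map (·.2) := by
  rw [PySem.Dict.keys_foldl_modify_key]
  simp [PySem.Set.mem_update, PySem.Dict.keys_empty]

-- ===== VERDICT (by name: the statement is the Claim_ definition above) =====
theorem find_highest_lowest_frequency_spec : Claim_equal_find_highest_lowest_frequency := by
  intro arr _ _
  unfold Spec_find_highest_lowest_frequency
  simp only [find_highest_lowest_frequency, find_highest_lowest_frequency_alt, count_step_eq]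
  set counts : PySem.Dict Int Int :=
    arr.foldl (fun d x => d.insert x (d.getD x 0 + 1)) PySem.Dict.empty with hc
  set buckets : PySem.Dict Int (List Int) :=
    counts.items.foldl (fun b q => b.modify q.2 [] (· ++ [q.1])) PySem.Dict.empty with hb
  have hmem : ∀ x, x ∈ counts.values ↔ x ∈ buckets.keys := by
    intro x
    rw [hb, buckets_keys_mem]
    simp [PySem.Dict.values]
  rw [max?_congr_mem counts.values buckets.keys hmem,
      min?_congr_mem counts.values buckets.keys hmem]
  cases hx : PySem.List.max? buckets.keys (fun v => v) with
  | none => rfl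
  | some hi =>
      cases hy : PySem.List.min? buckets.keys (fun v => v) with
      | none => rfl
      | some lo =>
          simp only [Prod.mk.injEq]
          constructor <;>
            · rw [comp_foldl, hb, buckets_getD]
              simp
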